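-- pv_equiv track=rewrite | github.com/JorgenWan/NestedNER | data/sampling.py | chunk_list_by_max_sum
-- ===== SOURCE A (Python) =====
-- def chunk_list_by_max_sum(l, max_sum):
--     """
--     Example:
--         Input:
--             l = [8, 3,2,1,5,3,6,3,1,7, 7,1]
--             max_size = 8
--         Output:
--             [(0, 0), (1, 3), (4, 5), (6, 6), (7, 8), (9, 9), (10, 11)]
--     Args:
--         l: List
--         max_sum: Int
--     Return:
--         indices: List[Tuple(Int, Int)], start and end are inclusive
--     """
--
--     indices = []
--     start, end = 0, 0
--     cur_sum = 0
--     for i in range(len(l)):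
--         assert l[i] <= max_sum
--         cur_sum += l[i]
--         if cur_sum <= max_sum:
--             end = i
--         else:
--             indices.append((start, end))
--             start = end = i
--             cur_sum = l[i]
--
--     if end < len(l):
--         indices.append((start, len(l) - 1))
--
--     return indices
-- ===== SOURCE B (Python) =====
-- def chunk_list_by_max_sum(l, max_sum):
--     """Staged re-implementation: validate, build a prefix-sum array, derive the
--     chunk-start positions by thresholding prefix differences, then pair
--     consecutive starts with zip. No running accumulator or emit-on-overflow."""
--     for x in l:
--         assert x <= max_sum
--     n = len(l)
--     prefix = [0]
--     for x in l:
--         prefix.append(prefix[-1] + x)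
--     starts = []
--     s = 0
--     while s < n:
--         starts.append(s)
--         j = s + 1
--         while j < n and prefix[j + 1] - prefix[s] <= max_sum:
--             j += 1
--         s = j
--     return [(a, b - 1) for a, b in zip(starts, starts[1:] + [n])]
-- ===== Notes on version B (the rewrite author's own statement) =====
-- stated objective: alternative
-- what changed: A's single stateful pass (running sum, emit-on-overflow, final fixup append) is replaced by staged passes over a different data structure: validate, precompute a prefix-sum array, derive chunk-start positions by comparing prefix-sum differences against max_sum, then build the output by zipping consecutive starts.
import Mathlib
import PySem

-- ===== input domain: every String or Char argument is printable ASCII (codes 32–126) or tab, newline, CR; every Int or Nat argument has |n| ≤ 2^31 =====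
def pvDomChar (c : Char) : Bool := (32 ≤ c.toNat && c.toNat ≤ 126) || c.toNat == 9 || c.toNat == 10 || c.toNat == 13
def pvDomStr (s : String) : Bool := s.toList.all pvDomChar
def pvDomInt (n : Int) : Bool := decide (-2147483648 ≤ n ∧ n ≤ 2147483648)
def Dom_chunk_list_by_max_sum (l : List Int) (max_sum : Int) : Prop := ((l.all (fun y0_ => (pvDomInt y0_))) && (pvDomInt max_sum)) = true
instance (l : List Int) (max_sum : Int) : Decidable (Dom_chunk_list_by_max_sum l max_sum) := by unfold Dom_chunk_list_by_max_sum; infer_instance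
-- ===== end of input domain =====

-- B replaces A's single stateful pass (running sum, emit-on-overflow, final fixup) by staged
-- passes: validate, precompute a prefix-sum array, derive chunk starts by thresholding prefix
-- differences, then pair consecutive starts with zip; objective: alternative, same cost;
-- return values proved equal on Pre_ (where A's assert does not raise).

-- ===== PORT A =====
-- single fold over range(len l) with state (indices, start, end, cur_sum), then the final fixup.
-- l[i] is ported as l.getD i 0: i ranges over List.range l.length, so it is always in range;
-- the assert is not modelled (Pre_ admits exactly the inputs where it passes).
def chunk_list_by_max_sum (l : List Int) (max_sum : Int) : List (Int × Int) :=
  let n := l.length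
  let s := (List.range n).foldl
    (fun (st : List (Int × Int) × Int × Int × Int) i =>
      let cur_sum := st.2.2.2 + l.getD i 0
      if cur_sum ≤ max_sum then (st.1, st.2.1, (i : Int), cur_sum)
      else (st.1 ++ [(st.2.1, st.2.2.1)], (i : Int), (i : Int), l.getD i 0))
    ([], 0, 0, 0)
  if s.2.2.1 < (n : Int) then s.1 ++ [(s.2.1, (n : Int) - 1)] else s.1

-- ===== PORT B =====
-- stage 1 of Source B: the prefix-sum list, built by appending prefix[-1] + x (prefix[-1] = getLastD 0,
-- exact here since the list is never empty).
def pvPrefix (l : List Int) : List Int :=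
  l.foldl (fun p x => p ++ [p.getLastD 0 + x]) [0]

-- Source B's inner while: advance j while j < n and prefix[j+1] - prefix[s] <= max_sum.
-- `fuel` (always ample) only makes the loop total.
def pvJump (l pre : List Int) (max_sum : Int) (fuel : Nat) (s j : Nat) : Nat :=
  match fuel with
  | 0 => j
  | fuel + 1 =>
    if j < l.length then
      if pre.getD (j + 1) 0 - pre.getD s 0 ≤ max_sum then pvJump l pre max_sum fuel s (j + 1)
      else j
    else j

-- Source B's outer while: collect the chunk-start positions; `fuel` (always ample) only makes it total.
def pvStarts (l pre : List Int) (max_sum : Int) (fuel : Nat) (s : Nat) : List Nat :=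
  match fuel with
  | 0 => []
  | fuel + 1 =>
    if s < l.length then s :: pvStarts l pre max_sum fuel (pvJump l pre max_sum l.length s (s + 1))
    else []

def chunk_list_by_max_sum_alt (l : List Int) (max_sum : Int) : List (Int × Int) :=
  let pre := pvPrefix l
  let starts := pvStarts l pre max_sum l.length 0
  (starts.zip (starts.drop 1 ++ [l.length])).map (fun p => ((p.1 : Int), (p.2 : Int) - 1))

-- ===== PRECONDITION & SPEC =====
-- Pre_ excludes exactly the inputs where Python A raises AssertionError (some element > max_sum);
-- Python B raises on the same inputs.
def Pre_chunk_list_by_max_sum (l : List Int) (max_sum : Int) : Prop :=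
  ∀ x ∈ l, x ≤ max_sum
instance (l : List Int) (max_sum : Int) : Decidable (Pre_chunk_list_by_max_sum l max_sum) := by
  unfold Pre_chunk_list_by_max_sum; infer_instance

def pvWitness_chunk_list_by_max_sum : List Int × Int := ([8, 3, 2, 1, 5, 3, 6, 3, 1, 7, 7, 1], 8)

def Spec_chunk_list_by_max_sum (l : List Int) (max_sum : Int) (out : List (Int × Int)) : Prop := out = chunk_list_by_max_sum_alt l max_sum
instance (l : List Int) (max_sum : Int) (out : List (Int × Int)) : Decidable (Spec_chunk_list_by_max_sum l max_sum out) := by unfold Spec_chunk_list_by_max_sum; infer_instance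

-- ===== CLAIM (what is proved, stated in full; the proofs are below) =====
def Claim_equal_chunk_list_by_max_sum : Prop := ∀ (l : List Int) (max_sum : Int), Dom_chunk_list_by_max_sum l max_sum → Pre_chunk_list_by_max_sum l max_sum → Spec_chunk_list_by_max_sum l max_sum (chunk_list_by_max_sum l max_sum)

-- ===== LEMMAS AND PROOFS =====

-- the prefix list is the list of partial sums
theorem pvPrefix_aux :
    ∀ (l p : List Int) (c : Int), p.getLastD 0 = c →
    l.foldl (fun p x => p ++ [p.getLastD 0 + x]) p
      = p ++ (List.range l.length).map (fun k => c + (l.take (k + 1)).sum) := by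
  intro l
  induction l with
  | nil => intro p c hc; simp
  | cons x t ih =>
    intro p c hc
    have hlast : (p ++ [c + x]).getLastD 0 = c + x := by
      simp [List.getLastD_eq_getLast?, List.getLast?_append]
    rw [List.foldl_cons, hc, ih (p ++ [c + x]) (c + x) hlast]
    simp only [List.length_cons, List.range_succ_eq_map, List.map_cons, List.map_map,
      List.append_assoc]
    congr 1
    simp only [List.take_succ_cons, List.sum_cons, List.singleton_append]
    congr 1
    · simp
    · apply List.map_congr_left
      intro k _
      simp [Function.comp]
      ring

theorem pvPrefix_eq (l : List Int) :
    pvPrefix l = 0 :: (List.range l.length).map (fun k => (l.take (k + 1)).sum) := by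
  unfold pvPrefix
  rw [pvPrefix_aux l [0] 0 (by simp)]
  simp

theorem pvPrefix_getD (l : List Int) (k : Nat) (hk : k ≤ l.length) :
    (pvPrefix l).getD k 0 = (l.take k).sum := by
  rw [pvPrefix_eq]
  cases k with
  | zero => simp
  | succ k =>
    have hk' : k < l.length := by omega
    simp [List.getD, hk']

theorem take_succ_sum (l : List Int) (i : Nat) (hi : i < l.length) :
    (l.take (i + 1)).sum = (l.take i).sum + l.getD i 0 := by
  have h : l[i]? = some l[i] := List.getElem?_eq_getElem hi
  rw [List.take_add_one, List.sum_append]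
  simp [h, List.getD]

-- the inner loop never moves backwards
theorem pvJump_ge (l pre : List Int) (max_sum : Int) :
    ∀ (fuel : Nat) (s j : Nat), j ≤ pvJump l pre max_sum fuel s j := by
  intro fuel
  induction fuel with
  | zero => intro s j; simp [pvJump]
  | succ f ih =>
    intro s j
    simp only [pvJump]
    split_ifs with h1 h2
    · exact le_trans (by omega) (ih s (j + 1))
    · exact le_refl j
    · exact le_refl j

-- any ample fuel computes the same inner-loop result
theorem pvJump_fuel (l pre : List Int) (max_sum : Int) :
    ∀ (f g : Nat) (s j : Nat), l.length - j ≤ f → l.length - j ≤ g →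
    pvJump l pre max_sum f s j = pvJump l pre max_sum g s j := by
  intro f
  induction f with
  | zero =>
    intro g s j hf hg
    have hlt : ¬ j < l.length := by omega
    cases g <;> simp [pvJump, hlt]
  | succ f ih =>
    intro g s j hf hg
    by_cases hlt : j < l.length
    · cases g with
      | zero => omega
      | succ g =>
        simp only [pvJump, if_pos hlt]
        split_ifs with h2
        · exact ih g s (j + 1) (by omega) (by omega)
        · rfl
    · cases g <;> simp [pvJump, hlt]

-- one step of the inner loop (with the real prefix list, condition rewritten to take-sums)
theorem pvJump_succ (l : List Int) (max_sum : Int) {f : Nat} {s j : Nat}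
    (hf : l.length - j ≤ f) (hs : s ≤ l.length) (hlt : j < l.length) :
    pvJump l (pvPrefix l) max_sum f s j
      = if (l.take (j + 1)).sum - (l.take s).sum ≤ max_sum
        then pvJump l (pvPrefix l) max_sum f s (j + 1) else j := by
  rw [pvJump_fuel l (pvPrefix l) max_sum f (l.length - j) s j hf (le_refl _)]
  have he : l.length - j = (l.length - (j + 1)) + 1 := by omega
  rw [he]
  simp only [pvJump, if_pos hlt]
  rw [pvPrefix_getD l (j + 1) (by omega), pvPrefix_getD l s hs]
  split_ifs with h2
  · exact pvJump_fuel l (pvPrefix l) max_sum (l.length - (j + 1)) f s (j + 1) (le_refl _) (by omega)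
  · rfl

theorem pvJump_stop (l pre : List Int) (max_sum : Int) {j : Nat} (hge : ¬ j < l.length)
    (f : Nat) (s : Nat) : pvJump l pre max_sum f s j = j := by
  cases f <;> simp [pvJump, hge]

-- any ample fuel computes the same outer-loop result
theorem pvStarts_fuel (l pre : List Int) (max_sum : Int) :
    ∀ (f g : Nat) (s : Nat), l.length - s ≤ f → l.length - s ≤ g →
    pvStarts l pre max_sum f s = pvStarts l pre max_sum g s := by
  intro f
  induction f with
  | zero =>
    intro g s hf hg
    have hlt : ¬ s < l.length := by omega
    cases g <;> simp [pvStarts, hlt]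
  | succ f ih =>
    intro g s hf hg
    by_cases hlt : s < l.length
    · cases g with
      | zero => omega
      | succ g =>
        simp only [pvStarts, if_pos hlt]
        have hj := pvJump_ge l pre max_sum l.length s (s + 1)
        congr 1
        exact ih g (pvJump l pre max_sum l.length s (s + 1)) (by omega) (by omega)
    · cases g <;> simp [pvStarts, hlt]

-- one step of the outer loop, for any ample fuel
theorem pvStarts_succ (l pre : List Int) (max_sum : Int) {f : Nat} {s : Nat}
    (hf : l.length - s ≤ f) (hlt : s < l.length) :
    pvStarts l pre max_sum f s
      = s :: pvStarts l pre max_sum f (pvJump l pre max_sum l.length s (s + 1)) := by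
  rw [pvStarts_fuel l pre max_sum f (l.length - s) s hf (le_refl _)]
  have he : l.length - s = (l.length - (s + 1)) + 1 := by omega
  rw [he]
  simp only [pvStarts, if_pos hlt]
  have hj := pvJump_ge l pre max_sum l.length s (s + 1)
  congr 1
  exact pvStarts_fuel l pre max_sum (l.length - (s + 1)) f
    (pvJump l pre max_sum l.length s (s + 1)) (by omega) (by omega)

theorem pvStarts_stop (l pre : List Int) (max_sum : Int) {s : Nat} (hge : ¬ s < l.length)
    (f : Nat) : pvStarts l pre max_sum f s = [] := by
  cases f <;> simp [pvStarts, hge]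

-- the pairing stage of Source B, as a function of the start list
def pvPairs (n : Nat) (xs : List Nat) : List (Int × Int) :=
  (xs.zip (xs.drop 1 ++ [n])).map (fun p => ((p.1 : Int), (p.2 : Int) - 1))

theorem pvPairs_cons (n : Nat) (a : Nat) (rest : List Nat) :
    pvPairs n (a :: rest) = ((a : Int), ((rest.headD n : Nat) : Int) - 1) :: pvPairs n rest := by
  cases rest <;> simp [pvPairs]

-- A's loop body (definitionally the lambda in the port, lets zeta-reduced)
def pvStepA (l : List Int) (max_sum : Int)
    (st : List (Int × Int) × Int × Int × Int) (i : Nat) : List (Int × Int) × Int × Int × Int :=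
  if st.2.2.2 + l.getD i 0 ≤ max_sum then (st.1, st.2.1, (i : Int), st.2.2.2 + l.getD i 0)
  else (st.1 ++ [(st.2.1, st.2.2.1)], (i : Int), (i : Int), l.getD i 0)

-- A's final fixup (definitionally the port's last line)
def pvAfter (l : List Int) (s : List (Int × Int) × Int × Int × Int) : List (Int × Int) :=
  if s.2.2.1 < (l.length : Int) then s.1 ++ [(s.2.1, (l.length : Int) - 1)] else s.1

-- main invariant: mid-loop with an open chunk at start s, last processed index i-1 and running
-- sum (take i).sum - (take s).sum, A's remaining fold plus the final fixup equals acc ++ the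
-- pairs B builds from s and the remaining chunk starts.
theorem pvMain (l : List Int) (max_sum : Int) :
    ∀ (k i : Nat), l.length - i = k → 1 ≤ i → i ≤ l.length →
    ∀ (acc : List (Int × Int)) (s : Nat), s < i →
    pvAfter l ((List.range' i (l.length - i)).foldl (pvStepA l max_sum)
        (acc, (s : Int), (i : Int) - 1, (l.take i).sum - (l.take s).sum))
      = acc ++ pvPairs l.length
          (s :: pvStarts l (pvPrefix l) max_sum l.length
                 (pvJump l (pvPrefix l) max_sum l.length s i)) := by
  intro k
  induction k with
  | zero =>
    intro i hk h1 hn acc s hs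
    have hi : i = l.length := by omega
    rw [hk]
    simp only [List.range'_zero, List.foldl_nil]
    have hB : pvJump l (pvPrefix l) max_sum l.length s i = i :=
      pvJump_stop l (pvPrefix l) max_sum (by omega) _ _
    have hO : pvStarts l (pvPrefix l) max_sum l.length i = [] :=
      pvStarts_stop l (pvPrefix l) max_sum (by omega) _
    rw [hB, hO, pvPairs_cons]
    rw [pvAfter, if_pos (by omega : (i : Int) - 1 < (l.length : Int))]
    simp [pvPairs]
  | succ k' ih =>
    intro i hk h1 hn acc s hs
    have hlt : i < l.length := by omega
    have hk' : l.length - (i + 1) = k' := by omega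
    have hr : List.range' i (l.length - i) = i :: List.range' (i + 1) k' := by
      rw [hk, List.range'_succ]
    rw [hr, List.foldl_cons]
    have hcur : ((l.take i).sum - (l.take s).sum) + l.getD i 0
        = (l.take (i + 1)).sum - (l.take s).sum := by
      rw [take_succ_sum l i hlt]; ring
    by_cases hfit : (l.take (i + 1)).sum - (l.take s).sum ≤ max_sum
    · -- element fits: A extends the chunk, B's inner scan advances
      have hA : pvStepA l max_sum (acc, (s : Int), (i : Int) - 1, (l.take i).sum - (l.take s).sum) i
          = (acc, (s : Int), ((i + 1 : Nat) : Int) - 1, (l.take (i + 1)).sum - (l.take s).sum) := by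
        simp only [pvStepA, hcur, if_pos hfit, Prod.mk.injEq, true_and, and_true]
        push_cast; ring
      have hB : pvJump l (pvPrefix l) max_sum l.length s i
          = pvJump l (pvPrefix l) max_sum l.length s (i + 1) := by
        rw [pvJump_succ l max_sum (Nat.sub_le _ _) (by omega) hlt, if_pos hfit]
      have hrec := ih (i + 1) hk' (by omega) (by omega) acc s (by omega)
      rw [hk'] at hrec
      rw [hA, hB, hrec]
    · -- element does not fit: A emits (s, i-1) and reopens at i; B closes the chunk at i
      have hA : pvStepA l max_sum (acc, (s : Int), (i : Int) - 1, (l.take i).sum - (l.take s).sum) i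
          = (acc ++ [((s : Int), (i : Int) - 1)], (i : Int), ((i + 1 : Nat) : Int) - 1,
             (l.take (i + 1)).sum - (l.take i).sum) := by
        simp only [pvStepA, hcur, if_neg hfit, Prod.mk.injEq, true_and]
        refine ⟨by push_cast; ring, by rw [take_succ_sum l i hlt]; ring⟩
      have hB : pvJump l (pvPrefix l) max_sum l.length s i = i := by
        rw [pvJump_succ l max_sum (Nat.sub_le _ _) (by omega) hlt, if_neg hfit]
      have hS : pvStarts l (pvPrefix l) max_sum l.length i
          = i :: pvStarts l (pvPrefix l) max_sum l.length
              (pvJump l (pvPrefix l) max_sum l.length i (i + 1)) :=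
        pvStarts_succ l (pvPrefix l) max_sum (Nat.sub_le _ _) hlt
      have hrec := ih (i + 1) hk' (by omega) (by omega)
        (acc ++ [((s : Int), (i : Int) - 1)]) i (by omega)
      rw [hk'] at hrec
      rw [hA, hrec, hB, hS]
      simp [pvPairs_cons]

-- ===== VERDICT (by name: the statement is the Claim_ definition above) =====
theorem chunk_list_by_max_sum_spec : Claim_equal_chunk_list_by_max_sum := by
  intro l max_sum _ hpre
  unfold Spec_chunk_list_by_max_sum chunk_list_by_max_sum chunk_list_by_max_sum_alt
  cases l with
  | nil => simp [pvStarts]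
  | cons a t =>
    have hfit0 : a ≤ max_sum := hpre a (by simp)
    show pvAfter (a :: t)
        ((List.range (a :: t).length).foldl (pvStepA (a :: t) max_sum) ([], 0, 0, 0))
      = pvPairs (a :: t).length
          (pvStarts (a :: t) (pvPrefix (a :: t)) max_sum (a :: t).length 0)
    have hr : List.range (a :: t).length = 0 :: List.range' 1 t.length := by
      rw [List.length_cons, List.range_eq_range', List.range'_succ]
    have hstep : pvStepA (a :: t) max_sum ([], 0, 0, 0) 0
        = ([], ((0 : Nat) : Int), ((1 : Nat) : Int) - 1,
           ((a :: t).take 1).sum - ((a :: t).take 0).sum) := by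
      simp [pvStepA, hfit0]
    have hmain := pvMain (a :: t) max_sum t.length 1 (by simp) (by omega) (by simp)
      [] 0 (by omega)
    simp only [List.length_cons, Nat.add_sub_cancel] at hmain
    have hS : pvStarts (a :: t) (pvPrefix (a :: t)) max_sum (a :: t).length 0
        = 0 :: pvStarts (a :: t) (pvPrefix (a :: t)) max_sum (a :: t).length
            (pvJump (a :: t) (pvPrefix (a :: t)) max_sum (a :: t).length 0 1) :=
      pvStarts_succ (a :: t) (pvPrefix (a :: t)) max_sum (Nat.sub_le _ _) (by simp)
    rw [hr, List.foldl_cons, hstep, hmain, hS]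
    simp
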